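-- pv_equiv track=rewrite | github.com/Pinkwjp/sorting-visualizer | src/sort_funcs.py | gen_quicksort
-- ===== SOURCE A (Python) =====
-- from typing import Generator, List, Dict, Tuple
--
-- def gen_quicksort(A: List[int]) -> Generator:
--     A = list(A)
--     partition_points: Dict[Tuple[int, int], int] = {}
--
--     def gen_partition(A: List[int], low, high) -> Generator:
--         yield A
--         pivot = A[high]
--         i = low - 1
--         for j in range(low, high):
--             if A[j] <= pivot:
--                 i += 1
--                 A[i], A[j] = A[j], A[i]
--                 yield A
--         A[i+1], A[high] = A[high], A[i+1]
--         yield A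
--         partition_points[(low, high)] = i+1
--
--     def gen_recur(A: List[int], low, high) -> Generator:
--         if low < high:
--             yield from gen_partition(A, low, high)
--             p = partition_points[((low, high))]
--             yield from gen_recur(A, low, p-1)
--             yield from gen_recur(A, p+1, high)
--
--     yield from gen_recur(A, 0, len(A) - 1)
-- ===== SOURCE B (Python) =====
-- from typing import Generator, List
--
-- def gen_quicksort(A: List[int]) -> Generator:
--     A = list(A)
--     stack = [(0, len(A) - 1)]
--     while stack:
--         low, high = stack.pop()
--         if low >= high:
--             continue
--         yield A
--         pivot = A[high]
--         i = low - 1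
--         for j in range(low, high):
--             if A[j] <= pivot:
--                 i += 1
--                 A[i], A[j] = A[j], A[i]
--                 yield A
--         A[i + 1], A[high] = A[high], A[i + 1]
--         yield A
--         stack.append((i + 2, high))
--         stack.append((low, i))
-- ===== Notes on version B (the rewrite author's own statement) =====
-- stated objective: alternative
-- what changed: The recursive generator and the partition_points dict are replaced by a single while-loop over an explicit stack of (low, high) ranges with the Lomuto partition inlined, pushing right-before-left to keep the pre-order frame sequence.
import Mathlib
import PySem

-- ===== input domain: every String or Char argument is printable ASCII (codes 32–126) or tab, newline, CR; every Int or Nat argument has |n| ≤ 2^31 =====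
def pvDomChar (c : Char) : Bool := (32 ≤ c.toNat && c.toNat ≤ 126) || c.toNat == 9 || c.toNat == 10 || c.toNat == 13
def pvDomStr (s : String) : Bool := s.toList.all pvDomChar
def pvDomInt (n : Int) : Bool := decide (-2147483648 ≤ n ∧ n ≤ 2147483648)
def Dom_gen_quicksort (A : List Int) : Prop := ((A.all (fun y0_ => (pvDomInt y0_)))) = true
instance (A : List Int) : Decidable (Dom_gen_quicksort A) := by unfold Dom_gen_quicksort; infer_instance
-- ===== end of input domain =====

-- B replaces A's recursive generator + partition_points dict by an explicit stack of
-- (low, high) ranges processed in one while-loop (alternative decomposition, same cost).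
-- Both Pythons yield the SAME mutated list object (every yielded reference equals the final
-- state once the generator is exhausted), so each port counts the yields and returns the
-- final array replicated once per yield — exact for a consumer that materialises the generator.

-- ===== PORT A =====

-- A[i], A[j] = A[j], A[i]  (indices are in range whenever this is executed; pyGetD/pySetD are exact there)
def qsSwapA (a : List Int) (i j : Int) : List Int :=
  let x := PySem.List.pyGetD a i 0
  let y := PySem.List.pyGetD a j 0
  PySem.List.pySetD (PySem.List.pySetD a i y) j x

-- gen_partition: returns (number of yields, final array, partition_points[(low,high)] = i+1);
-- loop state st = (yield count, array, i)
def qsPartA (a : List Int) (low high : Int) : Nat × List Int × Int :=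
  let pivot := PySem.List.pyGetD a high 0
  let st := (PySem.List.pyRange low high 1).foldl
    (fun (st : Nat × List Int × Int) j =>
      if PySem.List.pyGetD st.2.1 j 0 ≤ pivot then
        (st.1 + 1, qsSwapA st.2.1 (st.2.2 + 1) j, st.2.2 + 1)
      else st) (1, a, low - 1)
  (st.1 + 1, qsSwapA st.2.1 (st.2.2 + 1) high, st.2.2 + 1)

-- gen_recur: (number of yields, final array); the Nat fuel is only a totality guard
-- (recursion depth ≤ high-low+1 ≤ fuel on every call)
def qsRecA : Nat → List Int → Int → Int → Nat × List Int
  | 0, a, _, _ => (0, a)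
  | f + 1, a, low, high =>
    if low < high then
      let P := qsPartA a low high
      let L := qsRecA f P.2.1 low (P.2.2 - 1)
      let R := qsRecA f L.2 (P.2.2 + 1) high
      (P.1 + L.1 + R.1, R.2)
    else (0, a)

def gen_quicksort (A : List Int) : List (List Int) :=
  let R := qsRecA A.length A 0 ((A.length : Int) - 1)
  List.replicate R.1 R.2

-- ===== PORT B =====

def qsSwapB (a : List Int) (i j : Int) : List Int :=
  let x := PySem.List.pyGetD a i 0
  let y := PySem.List.pyGetD a j 0
  PySem.List.pySetD (PySem.List.pySetD a i y) j x

-- the inlined 'for j in range(low, high)' loop; state = (yield count so far, array, i)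
def qsLoopB (pivot : Int) : List Int → Nat × List Int × Int → Nat × List Int × Int
  | [], st => st
  | j :: js, st =>
    if PySem.List.pyGetD st.2.1 j 0 ≤ pivot then
      qsLoopB pivot js (st.1 + 1, qsSwapB st.2.1 (st.2.2 + 1) j, st.2.2 + 1)
    else qsLoopB pivot js st

-- the while-loop over the explicit stack (top of stack = head of the list), returning
-- (number of yields, final array); the Nat fuel is only a totality guard (total pops ≤ 2·len+1)
def qsStackB : Nat → List Int → List (Int × Int) → Nat × List Int
  | 0, a, _ => (0, a)
  | f + 1, a, stack =>
    match stack with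
    | [] => (0, a)
    | (low, high) :: rest =>
      if low < high then
        let pivot := PySem.List.pyGetD a high 0
        let st := qsLoopB pivot (PySem.List.pyRange low high 1) (1, a, low - 1)
        let a2 := qsSwapB st.2.1 (st.2.2 + 1) high
        let T := qsStackB f a2 ((low, st.2.2) :: (st.2.2 + 2, high) :: rest)
        (st.1 + 1 + T.1, T.2)
      else qsStackB f a rest

def gen_quicksort_alt (A : List Int) : List (List Int) :=
  let R := qsStackB (2 * A.length + 1) A [(0, (A.length : Int) - 1)]
  List.replicate R.1 R.2

-- ===== PRECONDITION & SPEC =====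
def Spec_gen_quicksort (A : List Int) (out : List (List Int)) : Prop := out = gen_quicksort_alt A
instance (A : List Int) (out : List (List Int)) : Decidable (Spec_gen_quicksort A out) := by unfold Spec_gen_quicksort; infer_instance

-- ===== CLAIM (what is proved, stated in full; the proofs are below) =====
def Claim_equal_gen_quicksort : Prop := ∀ (A : List Int), Dom_gen_quicksort A → Spec_gen_quicksort A (gen_quicksort A)

-- ===== LEMMAS AND PROOFS =====

theorem qsLoopB_eq_foldl (pivot : Int) (js : List Int) (st : Nat × List Int × Int) :
    qsLoopB pivot js st = js.foldl
      (fun (st : Nat × List Int × Int) j =>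
        if PySem.List.pyGetD st.2.1 j 0 ≤ pivot then
          (st.1 + 1, qsSwapA st.2.1 (st.2.2 + 1) j, st.2.2 + 1)
        else st) st := by
  induction js generalizing st with
  | nil => rfl
  | cons j js ih =>
    simp only [qsLoopB, List.foldl_cons]
    by_cases h : PySem.List.pyGetD st.2.1 j 0 ≤ pivot <;> simp [h, ih, qsSwapA, qsSwapB]

-- bounds on the i-component of the partition fold
theorem qsPart_fold_bound (pivot : Int) (js : List Int) (st : Nat × List Int × Int) :
    st.2.2 ≤ (js.foldl
      (fun (st : Nat × List Int × Int) j =>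
        if PySem.List.pyGetD st.2.1 j 0 ≤ pivot then
          (st.1 + 1, qsSwapA st.2.1 (st.2.2 + 1) j, st.2.2 + 1)
        else st) st).2.2
    ∧ (js.foldl
      (fun (st : Nat × List Int × Int) j =>
        if PySem.List.pyGetD st.2.1 j 0 ≤ pivot then
          (st.1 + 1, qsSwapA st.2.1 (st.2.2 + 1) j, st.2.2 + 1)
        else st) st).2.2 ≤ st.2.2 + js.length := by
  induction js generalizing st with
  | nil => simp
  | cons j js ih =>
    simp only [List.foldl_cons, List.length_cons]
    by_cases h : PySem.List.pyGetD st.2.1 j 0 ≤ pivot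
    · simp only [h, if_pos]
      have := ih (st.1 + 1, qsSwapA st.2.1 (st.2.2 + 1) j, st.2.2 + 1)
      dsimp only at this
      constructor <;> omega
    · simp only [h, if_neg, not_false_iff]
      have := ih st
      constructor <;> omega

theorem qsPartA_p_bound (a : List Int) (low high : Int) (h : low < high) :
    low ≤ (qsPartA a low high).2.2 ∧ (qsPartA a low high).2.2 ≤ high := by
  unfold qsPartA
  have hb := qsPart_fold_bound (PySem.List.pyGetD a high 0) (PySem.List.pyRange low high 1)
    (1, a, low - 1)
  have hl : (PySem.List.pyRange low high 1).length = (high - low).toNat :=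
    PySem.List.length_pyRange_one low high
  simp only at hb ⊢
  omega

theorem qsRecA_nonpos (a : List Int) (low high : Int) (h : ¬ low < high) (f : Nat) :
    qsRecA f a low high = (0, a) := by
  cases f <;> simp [qsRecA, h]

-- fuel irrelevance for A's recursion
theorem qsRecA_mono (f : Nat) : ∀ (f' : Nat) (a : List Int) (low high : Int),
    (high - low + 1).toNat ≤ f → (high - low + 1).toNat ≤ f' →
    qsRecA f a low high = qsRecA f' a low high := by
  induction f with
  | zero =>
    intro f' a low high hf hf'
    have h : ¬ low < high := by omega
    rw [qsRecA_nonpos a low high h, qsRecA_nonpos a low high h]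
  | succ f ih =>
    intro f' a low high hf hf'
    by_cases h : low < high
    · cases f' with
      | zero => omega
      | succ f' =>
        simp only [qsRecA, h, if_pos]
        obtain ⟨hp1, hp2⟩ := qsPartA_p_bound a low high h
        rw [ih f' (qsPartA a low high).2.1 low ((qsPartA a low high).2.2 - 1) (by omega) (by omega)]
        rw [ih f' _ ((qsPartA a low high).2.2 + 1) high (by omega) (by omega)]
    · rw [qsRecA_nonpos a low high h, qsRecA_nonpos a low high h]

-- sequential recursive processing of a whole stack of ranges (proof-side reference semantics)
def qsRecSeq : List Int → List (Int × Int) → Nat × List Int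
  | a, [] => (0, a)
  | a, (low, high) :: rest =>
    let T := qsRecA (high - low + 1).toNat a low high
    let S := qsRecSeq T.2 rest
    (T.1 + S.1, S.2)

-- fuel weight of a stack
def qsWeight : List (Int × Int) → Nat
  | [] => 0
  | (low, high) :: rest => 2 * (high - low + 1).toNat + 1 + qsWeight rest

-- B's step on an active range, phrased through qsPartA
theorem qsStackB_cons_lt (f : Nat) (a : List Int) (low high : Int) (rest : List (Int × Int))
    (h : low < high) :
    qsStackB (f + 1) a ((low, high) :: rest) =
      ((qsPartA a low high).1 + (qsStackB f (qsPartA a low high).2.1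
          ((low, (qsPartA a low high).2.2 - 1) :: ((qsPartA a low high).2.2 + 1, high) :: rest)).1,
       (qsStackB f (qsPartA a low high).2.1
          ((low, (qsPartA a low high).2.2 - 1) :: ((qsPartA a low high).2.2 + 1, high) :: rest)).2) := by
  simp only [qsStackB, h, if_pos, qsLoopB_eq_foldl, qsPartA, qsSwapA, qsSwapB,
    add_sub_cancel_right, add_assoc]
  norm_num

theorem qsStackB_eq_recSeq (f : Nat) : ∀ (a : List Int) (stack : List (Int × Int)),
    qsWeight stack ≤ f → qsStackB f a stack = qsRecSeq a stack := by
  induction f with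
  | zero =>
    intro a stack hw
    cases stack with
    | nil => simp [qsStackB, qsRecSeq]
    | cons r rest => obtain ⟨l, h⟩ := r; simp [qsWeight] at hw
  | succ f ih =>
    intro a stack hw
    cases stack with
    | nil => simp [qsStackB, qsRecSeq]
    | cons r rest =>
      obtain ⟨low, high⟩ := r
      simp only [qsWeight] at hw
      by_cases h : low < high
      · obtain ⟨hp1, hp2⟩ := qsPartA_p_bound a low high h
        rw [qsStackB_cons_lt f a low high rest h]
        rw [ih (qsPartA a low high).2.1 _ (by simp only [qsWeight]; omega)]
        -- unfold the recursive reference semantics on both sides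
        have hs : (high - low + 1).toNat = ((high - low + 1).toNat - 1) + 1 := by omega
        simp only [qsRecSeq]
        rw [hs]
        simp only [qsRecA, h, if_pos]
        rw [qsRecA_mono ((qsPartA a low high).2.2 - 1 - low + 1).toNat ((high - low + 1).toNat - 1)
              (qsPartA a low high).2.1 low ((qsPartA a low high).2.2 - 1) (by omega) (by omega)]
        rw [qsRecA_mono (high - ((qsPartA a low high).2.2 + 1) + 1).toNat ((high - low + 1).toNat - 1)
              _ ((qsPartA a low high).2.2 + 1) high (by omega) (by omega)]
        simp [add_assoc]
      · simp only [qsStackB, h, if_neg, not_false_iff]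
        rw [ih a rest (by omega)]
        simp [qsRecSeq, qsRecA_nonpos a low high h]

-- ===== VERDICT (by name: the statement is the Claim_ definition above) =====
theorem gen_quicksort_spec : Claim_equal_gen_quicksort := by
  intro A _
  unfold Spec_gen_quicksort gen_quicksort gen_quicksort_alt
  rw [qsStackB_eq_recSeq (2 * A.length + 1) A [(0, (A.length : Int) - 1)]
        (by simp only [qsWeight]; omega)]
  simp only [qsRecSeq]
  rw [qsRecA_mono (((A.length : Int) - 1) - 0 + 1).toNat A.length A 0 ((A.length : Int) - 1)
        (by omega) (by omega)]
  simp
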